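-- pv_equiv track=rewrite | github.com/zeyu-chen/25t1-comp9021-labs | Lab 4/Solutions/ex_3_sol.py | f3_3
-- ===== SOURCE A (Python) =====
-- def f3_3(L: list) -> list:
--     """
--     Removes elements from a list where the element is the arithmetic mean of its neighbors.
--
--     Uses recursive filtering approach, repeatedly building new lists until no more
--     elements can be removed.
--
--     Args:
--         L: A list of numbers
--
--     Returns:
--         A new list with arithmetic mean elements removed
--     """
--     # Handle edge cases
--     if len(L) <= 2:
--         return L.copy()
--
--     # Function to check if any element is the arithmetic mean of its neighbors
--     def has_arithmetic_mean(lst):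
--         for i in range(1, len(lst) - 1):
--             if lst[i - 1] + lst[i + 1] == lst[i] * 2:
--                 return True
--         return False
--
--     # Function to filter out elements that are arithmetic means of their neighbors
--     def filter_one_pass(lst):
--         if len(lst) <= 2:
--             return lst.copy()
--
--         result = [lst[0]]  # First element is always kept
--
--         # Filter middle elements
--         for i in range(1, len(lst) - 1):
--             if lst[i - 1] + lst[i + 1] != lst[i] * 2:
--                 result.append(lst[i])
--
--         result.append(lst[-1])  # Last element is always kept
--         return result
--
--     # Apply filtering passes until the list stabilizes
--     current = L.copy()
--     while has_arithmetic_mean(current):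
--         current = filter_one_pass(current)
--
--     return current
-- ===== SOURCE B (Python) =====
-- def f3_3(L: list) -> list:
--     """Difference-sequence reformulation: an element equals the mean of its
--     neighbours iff its two adjacent differences are equal, so one removal pass
--     is exactly run-length-collapsing equal adjacent differences (a run of k
--     copies of d becomes the single value k*d).  Iterate the collapse to a fixed
--     point, then rebuild the list from its first element by prefix sums."""
--     if not L:
--         return []
--     diffs = [b - a for a, b in zip(L, L[1:])]
--     while True:
--         new = collapse(diffs)
--         if len(new) == len(diffs):
--             break
--         diffs = new
--     return reconstruct(L[0], diffs)
--
--
-- def collapse(diffs):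
--     """Merge each maximal run of equal values into its sum."""
--     out = []
--     i = 0
--     n = len(diffs)
--     while i < n:
--         j = i + 1
--         while j < n and diffs[j] == diffs[i]:
--             j += 1
--         out.append((j - i) * diffs[i])
--         i = j
--     return out
--
--
-- def reconstruct(first, diffs):
--     """Prefix sums: the list whose first element is `first` and whose
--     consecutive differences are `diffs`."""
--     out = [first]
--     for d in diffs:
--         out.append(out[-1] + d)
--     return out
-- ===== Notes on version B (the rewrite author's own statement) =====
-- stated objective: alternative
-- what changed: Recasts the problem on the difference sequence: an element equals the mean of its neighbours iff its two adjacent differences are equal, so each of A's removal passes becomes run-length-collapsing maximal runs of equal adjacent differences (a run of k copies of d becomes k*d); the collapse is iterated to a fixed point and the list is rebuilt from its first element by prefix sums.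
import Mathlib
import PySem

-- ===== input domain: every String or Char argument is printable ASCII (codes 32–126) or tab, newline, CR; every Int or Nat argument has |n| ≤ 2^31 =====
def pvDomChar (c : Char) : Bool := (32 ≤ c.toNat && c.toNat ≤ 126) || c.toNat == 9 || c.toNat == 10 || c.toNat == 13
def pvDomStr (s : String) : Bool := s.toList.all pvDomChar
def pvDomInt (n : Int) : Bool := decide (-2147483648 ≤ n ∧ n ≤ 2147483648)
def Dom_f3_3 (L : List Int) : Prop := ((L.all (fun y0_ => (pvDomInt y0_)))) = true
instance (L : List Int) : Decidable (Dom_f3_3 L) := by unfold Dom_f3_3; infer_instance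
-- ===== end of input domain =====

-- B recasts A's repeated neighbour-mean filtering on the difference sequence:
-- an element equals the mean of its neighbours iff its two adjacent differences are
-- equal, so each pass becomes run-length-collapsing equal adjacent differences,
-- and the result is rebuilt by prefix sums (objective: alternative algorithm).

-- ===== PORT A =====
-- has_arithmetic_mean(lst)
def pvHasAM (lst : List Int) : Bool :=
  (PySem.List.pyRange 1 ((lst.length : Int) - 1) 1).any fun i =>
    PySem.List.pyGetD lst (i - 1) 0 + PySem.List.pyGetD lst (i + 1) 0
      == PySem.List.pyGetD lst i 0 * 2

-- filter_one_pass(lst)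
def pvFilterOnePass (lst : List Int) : List Int :=
  if lst.length ≤ 2 then lst
  else
    ((PySem.List.pyRange 1 ((lst.length : Int) - 1) 1).foldl
      (fun acc i =>
        if !(PySem.List.pyGetD lst (i - 1) 0 + PySem.List.pyGetD lst (i + 1) 0
              == PySem.List.pyGetD lst i 0 * 2)
        then acc ++ [PySem.List.pyGetD lst i 0] else acc)
      [PySem.List.pyGetD lst 0 0]) ++ [PySem.List.pyGetD lst (-1) 0]

-- the 'while has_arithmetic_mean(current)' loop; fuel only makes it total
-- (each executed pass strictly shortens the list, so L.length fuel suffices)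
def pvLoopA : Nat → List Int → List Int
  | 0, cur => cur
  | Nat.succ n, cur => if pvHasAM cur then pvLoopA n (pvFilterOnePass cur) else cur

def f3_3 (L : List Int) : List Int :=
  if L.length ≤ 2 then L else pvLoopA L.length L

-- ===== PORT B =====
-- diffs = [b - a for a, b in zip(L, L[1:])]
def pvDiffs (l : List Int) : List Int := (l.zip (l.drop 1)).map (fun p => p.2 - p.1)

-- collapse(diffs): merge each maximal run of equal values into its sum;
-- the inner index scan i..j over one run is the takeWhile/dropWhile split
def pvCollapse : List Int → List Int
  | [] => []
  | d :: tl =>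
    (((tl.takeWhile (· == d)).length + 1 : Int) * d) :: pvCollapse (tl.dropWhile (· == d))
  termination_by l => l.length
  decreasing_by simpa using Nat.lt_succ_of_le (List.length_dropWhile_le (· == d) tl)

-- reconstruct(first, diffs): out = [first]; for d in diffs: out.append(out[-1] + d)
def pvRecon (first : Int) (diffs : List Int) : List Int :=
  diffs.foldl (fun out d => out ++ [PySem.List.pyGetD out (-1) 0 + d]) [first]

-- the 'while True: new = collapse(diffs); break on unchanged length' loop; fuel only makes it total
def pvLoopC : Nat → List Int → List Int
  | 0, ds => ds
  | Nat.succ n, ds =>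
    let nw := pvCollapse ds
    if nw.length = ds.length then ds else pvLoopC n nw

def f3_3_alt (L : List Int) : List Int :=
  match L with
  | [] => []
  | x :: _ => pvRecon x (pvLoopC L.length (pvDiffs L))

-- ===== PRECONDITION & SPEC =====
def Spec_f3_3 (L : List Int) (out : List Int) : Prop := out = f3_3_alt L
instance (L : List Int) (out : List Int) : Decidable (Spec_f3_3 L out) := by unfold Spec_f3_3; infer_instance

-- ===== CLAIM (what is proved, stated in full; the proofs are below) =====
def Claim_equal_f3_3 : Prop := ∀ (L : List Int), Dom_f3_3 L → Spec_f3_3 L (f3_3 L)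

-- ===== LEMMAS AND PROOFS =====

-- clean recursive reconstruction (proof-side mirror of pvRecon)
def pvRC : Int → List Int → List Int
  | x, [] => [x]
  | x, d :: ds => x :: pvRC (x + d) ds

-- structural mirror of one filtering pass's middle section (prev original element as state)
def pvMid : Int → List Int → List Int
  | _, [] => []
  | _, [b] => [b]
  | a, b :: c :: r => (if a + c == b * 2 then [] else [b]) ++ pvMid b (c :: r)

-- some two adjacent elements are equal
def pvHasRun : List Int → Bool
  | [] => false
  | [_] => false
  | d :: d' :: r => (d == d') || pvHasRun (d' :: r)

-- negative index -1 reads the last element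
lemma pv_pyGetD_neg_one (l : List Int) (h0 : 0 < l.length) :
    PySem.List.pyGetD l (-1) 0 = l.getD (l.length - 1) 0 := by
  unfold PySem.List.pyGetD PySem.List.pyGet? PySem.List.pyIdx?
  rw [if_neg (by norm_num), if_pos (by omega)]
  norm_num [List.getD_eq_getElem?_getD]

-- the middle-window condition, indexed from 0
def pvCond (l : List Int) (k : Nat) : Bool :=
  l.getD k 0 + l.getD (k + 2) 0 == l.getD (k + 1) 0 * 2

lemma pv_getD_int (l : List Int) (i : Int) (m : Nat) (h : 0 ≤ i) (hm : i.toNat = m) :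
    PySem.List.pyGetD l i 0 = l.getD m 0 := by
  rw [PySem.List.pyGetD_of_nonneg l 0 h, hm]

lemma pv_hasAM_eq (l : List Int) :
    pvHasAM l = (List.range (l.length - 2)).any (pvCond l) := by
  unfold pvHasAM
  rw [PySem.List.pyRange_one, List.any_map]
  have hn : (((l.length : Int) - 1) - 1).toNat = l.length - 2 := by omega
  rw [hn]
  refine List.any_congr rfl ?_
  intro k
  simp only [Function.comp_apply,
    pv_getD_int l (1 + (k : Int) - 1) k (by omega) (by omega),
    pv_getD_int l (1 + (k : Int) + 1) (k + 2) (by omega) (by omega),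
    pv_getD_int l (1 + (k : Int)) (k + 1) (by omega) (by omega), pvCond]

-- one pass, written as first element ++ kept middles ++ last element
lemma pv_filterA_eq (l : List Int) (h : ¬ l.length ≤ 2) :
    pvFilterOnePass l
      = [l.getD 0 0]
        ++ ((List.range (l.length - 2)).filter (fun k => !(pvCond l k))).map (fun k => l.getD (k + 1) 0)
        ++ [l.getD (l.length - 1) 0] := by
  unfold pvFilterOnePass
  rw [if_neg h, PySem.List.foldl_append_if, PySem.List.pyRange_one]
  have hn : (((l.length : Int) - 1) - 1).toNat = l.length - 2 := by omega
  rw [hn, List.filter_map, List.map_map,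
    pv_getD_int l 0 0 (by norm_num) (by norm_num), pv_pyGetD_neg_one l (by omega)]
  have hfilt : ∀ k ∈ List.range (l.length - 2),
      ((fun i => !(PySem.List.pyGetD l (i - 1) 0 + PySem.List.pyGetD l (i + 1) 0
          == PySem.List.pyGetD l i 0 * 2)) ∘ fun (k : Nat) => 1 + (k : Int)) k
        = (fun k => !(pvCond l k)) k := by
    intro k _
    simp only [Function.comp_apply,
      pv_getD_int l (1 + (k : Int) - 1) k (by omega) (by omega),
      pv_getD_int l (1 + (k : Int) + 1) (k + 2) (by omega) (by omega),
      pv_getD_int l (1 + (k : Int)) (k + 1) (by omega) (by omega), pvCond]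
  rw [List.filter_congr hfilt]
  congr 2
  apply List.map_congr_left
  intro k _
  simp only [Function.comp_apply,
    pv_getD_int l (1 + (k : Int)) (k + 1) (by omega) (by omega)]

-- pvRC always starts with its seed
lemma pvRC_cons (x : Int) (ds : List Int) : ∃ t, pvRC x ds = x :: t := by
  cases ds <;> exact ⟨_, rfl⟩

lemma pvRC_length (x : Int) (ds : List Int) : (pvRC x ds).length = ds.length + 1 := by
  induction ds generalizing x with
  | nil => rfl
  | cons d ds ih => simp [pvRC, ih]

-- out[-1] of a list ending in x is x
lemma pv_last_append (pre : List Int) (x : Int) :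
    PySem.List.pyGetD (pre ++ [x]) (-1) 0 = x := by
  rw [pv_pyGetD_neg_one _ (by simp)]
  simp [List.getD_eq_getElem?_getD]

-- pvRecon is pvRC
lemma pv_recon_aux (ds : List Int) (pre : List Int) (x : Int) :
    ds.foldl (fun out d => out ++ [PySem.List.pyGetD out (-1) 0 + d]) (pre ++ [x])
      = pre ++ pvRC x ds := by
  induction ds generalizing pre x with
  | nil => simp [pvRC]
  | cons d ds ih =>
    simp only [List.foldl_cons, pv_last_append]
    rw [show pre ++ [x] ++ [x + d] = (pre ++ [x]) ++ [x + d] from rfl,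
      ih (pre ++ [x]) (x + d)]
    simp [pvRC]

lemma pv_recon_eq (x : Int) (ds : List Int) : pvRecon x ds = pvRC x ds := by
  have := pv_recon_aux ds [] x
  simpa [pvRecon] using this

-- diffs of a cons pair
lemma pv_diffs_cons (a b : Int) (r : List Int) :
    pvDiffs (a :: b :: r) = (b - a) :: pvDiffs (b :: r) := by
  simp [pvDiffs]

-- reconstructing a list from its own diffs gives the list back
lemma pv_recon_diffs (x : Int) (rest : List Int) :
    pvRC x (pvDiffs (x :: rest)) = x :: rest := by
  induction rest generalizing x with
  | nil => rfl
  | cons b r ih =>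
    rw [pv_diffs_cons, pvRC]
    have hx : x + (b - x) = b := by ring
    rw [hx, ih b]

-- diffs of a reconstruction are the diffs it was built from
lemma pv_diffs_RC (x : Int) (ds : List Int) : pvDiffs (pvRC x ds) = ds := by
  induction ds generalizing x with
  | nil => rfl
  | cons d ds ih =>
    obtain ⟨t, ht⟩ := pvRC_cons (x + d) ds
    rw [pvRC, ht, pv_diffs_cons, ← ht, ih]
    congr 1
    ring

-- the kept middles ++ last of one pass equal pvMid
lemma pv_mid_eq (rest : List Int) (a : Int) (hne : rest ≠ []) :
    ((List.range ((a :: rest).length - 2)).filter (fun k => !(pvCond (a :: rest) k))).map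
        (fun k => (a :: rest).getD (k + 1) 0)
      ++ [(a :: rest).getD ((a :: rest).length - 1) 0] = pvMid a rest := by
  induction rest generalizing a with
  | nil => exact absurd rfl hne
  | cons b r ih =>
    cases r with
    | nil => simp [pvMid, pvCond]
    | cons c r2 =>
      have hlen : (a :: b :: c :: r2).length - 2 = r2.length + 1 := by simp
      rw [hlen, List.range_succ_eq_map, List.filter_cons]
      have hshift : ((List.map Nat.succ (List.range r2.length)).filter
            (fun k => !(pvCond (a :: b :: c :: r2) k)))
          = List.map Nat.succ ((List.range r2.length).filter
            (fun k => !(pvCond (b :: c :: r2) k))) := by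
        rw [List.filter_map]
        congr 1
      rw [hshift]
      have hmap : (List.map Nat.succ ((List.range r2.length).filter
              (fun k => !(pvCond (b :: c :: r2) k)))).map
            (fun k => (a :: b :: c :: r2).getD (k + 1) 0)
          = ((List.range r2.length).filter (fun k => !(pvCond (b :: c :: r2) k))).map
            (fun k => (b :: c :: r2).getD (k + 1) 0) := by
        rw [List.map_map]
        apply List.map_congr_left
        intro k _
        simp [Function.comp_apply]
      have hlast : (a :: b :: c :: r2).getD ((a :: b :: c :: r2).length - 1) 0
          = (b :: c :: r2).getD ((b :: c :: r2).length - 1) 0 := by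
        simp
      have ihr := ih b (by simp)
      have hlen2 : (b :: c :: r2).length - 2 = r2.length := by simp
      rw [hlen2] at ihr
      have hc0 : pvCond (a :: b :: c :: r2) 0 = (a + c == b * 2) := by
        simp [pvCond]
      by_cases hcond : (a + c == b * 2) = true
      · simp only [hc0, hcond, Bool.not_true, Bool.false_eq_true, if_false]
        rw [hmap, hlast, ihr]
        simp [pvMid, hcond]
      · have hcond' : (a + c == b * 2) = false := by simpa using hcond
        simp only [hc0, hcond', Bool.not_false, if_true, List.map_cons]
        rw [hmap, hlast]
        have hb : (a :: b :: c :: r2).getD (0 + 1) 0 = b := by simp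
        rw [hb]
        simp only [List.cons_append]
        rw [ihr]
        simp [pvMid, hcond']

lemma pv_filter_eq_mid (a : Int) (rest : List Int) (h : 2 ≤ rest.length) :
    pvFilterOnePass (a :: rest) = a :: pvMid a rest := by
  rw [pv_filterA_eq (a :: rest) (by simp; omega)]
  have := pv_mid_eq rest a (by intro h'; subst h'; simp at h)
  simp only [List.getD_cons_zero, List.cons_append, List.nil_append]
  rw [this]

-- the mean condition on a window is equality of its two diffs
lemma pv_cond_diff (a b c : Int) : (a + c == b * 2) = (b - a == c - b) := by
  by_cases h : a + c = b * 2
  · have h2 : b - a = c - b := by omega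
    simp [h, h2]
  · have h2 : ¬ (b - a = c - b) := by omega
    simp [h, h2]

-- has_arithmetic_mean detects exactly a run of equal adjacent diffs
lemma pv_hasAM_hasRun (l : List Int) : pvHasAM l = pvHasRun (pvDiffs l) := by
  rw [pv_hasAM_eq]
  cases l with
  | nil => rfl
  | cons a rest =>
    induction rest generalizing a with
    | nil => rfl
    | cons b r ih =>
      cases r with
      | nil => rfl
      | cons c r2 =>
        have hlen : (a :: b :: c :: r2).length - 2 = r2.length + 1 := by simp
        rw [hlen, List.range_succ_eq_map, List.any_cons, List.any_map]
        have hshift : ∀ k : Nat,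
            (pvCond (a :: b :: c :: r2) ∘ Nat.succ) k = pvCond (b :: c :: r2) k := by
          intro k
          simp [Function.comp_apply, pvCond]
        rw [List.any_congr rfl hshift]
        have ihr := ih b
        have hlen2 : (b :: c :: r2).length - 2 = r2.length := by simp
        rw [hlen2] at ihr
        have hc0 : pvCond (a :: b :: c :: r2) 0 = (a + c == b * 2) := by simp [pvCond]
        rw [ihr, hc0, pv_cond_diff a b c,
          pv_diffs_cons a b (c :: r2), pv_diffs_cons b c r2]
        rfl

-- collapse never lengthens
lemma pv_collapse_le (ds : List Int) : (pvCollapse ds).length ≤ ds.length := by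
  induction ds using pvCollapse.induct with
  | case1 => rw [pvCollapse]
  | case2 d tl ih =>
    rw [pvCollapse]
    have := List.length_dropWhile_le (· == d) tl
    simp only [List.length_cons]
    omega

-- without a run, collapse is the identity
lemma pv_collapse_noRun (ds : List Int) : pvHasRun ds = false → pvCollapse ds = ds := by
  induction ds using pvCollapse.induct with
  | case1 => intro _; rw [pvCollapse]
  | case2 d tl ih =>
    intro h
    cases tl with
    | nil => rw [pvCollapse]; simp [pvCollapse]
    | cons e tl2 =>
      have h1 : ¬ d = e := by
        intro he
        subst he
        simp [pvHasRun] at h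
      have h2 : pvHasRun (e :: tl2) = false := by
        simp only [pvHasRun, Bool.or_eq_false_iff] at h
        exact h.2
      have hne : (e == d) = false := by
        simp only [beq_eq_false_iff_ne, ne_eq]
        omega
      have htw : (e :: tl2).takeWhile (· == d) = [] := by
        simp [hne]
      have hdw : (e :: tl2).dropWhile (· == d) = e :: tl2 := by
        simp [hne]
      rw [hdw] at ih
      rw [pvCollapse, htw, hdw, ih h2]
      simp

-- with a run, collapse strictly shortens
lemma pv_collapse_lt (ds : List Int) : pvHasRun ds = true → (pvCollapse ds).length < ds.length := by
  induction ds using pvCollapse.induct with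
  | case1 => intro h; simp [pvHasRun] at h
  | case2 d tl ih =>
    intro h
    cases tl with
    | nil => simp [pvHasRun] at h
    | cons e tl2 =>
      by_cases hde : e = d
      · subst hde
        rw [pvCollapse]
        have htw : 1 ≤ ((e :: tl2).takeWhile (· == e)).length := by
          simp
        have hsum : ((e :: tl2).takeWhile (· == e)).length
            + ((e :: tl2).dropWhile (· == e)).length = tl2.length + 1 := by
          have h0 := congrArg List.length
            (List.takeWhile_append_dropWhile (p := (· == e)) (l := e :: tl2))
          rw [List.length_append] at h0
          simpa only [List.length_cons] using h0
        have hle := pv_collapse_le ((e :: tl2).dropWhile (· == e))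
        simp only [List.length_cons]
        omega
      · have hne : (e == d) = false := by
          simp only [beq_eq_false_iff_ne, ne_eq]
          omega
        have htl : pvHasRun (e :: tl2) = true := by
          simp only [pvHasRun] at h
          rcases Bool.or_eq_true_iff.mp h with h1 | h1
          · exact absurd (beq_iff_eq.mp h1) (fun hh => hde hh.symm)
          · exact h1
        have htw : (e :: tl2).takeWhile (· == d) = [] := by
          simp [hne]
        have hdw : (e :: tl2).dropWhile (· == d) = e :: tl2 := by
          simp [hne]
        rw [hdw] at ih
        rw [pvCollapse, htw, hdw]
        have h3 := ih htl
        simp only [List.length_cons] at h3 ⊢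
        omega

-- one filtering pass on the list is one collapse on the diffs
lemma pv_mid_collapse (ds : List Int) (a d : Int) :
    pvMid a (pvRC (a + d) ds)
      = pvRC (a + ((ds.takeWhile (· == d)).length + 1 : Int) * d)
          (pvCollapse (ds.dropWhile (· == d))) := by
  induction ds generalizing a d with
  | nil => simp [pvRC, pvMid, pvCollapse]
  | cons e ds2 ih =>
    by_cases hde : e = d
    · subst hde
      obtain ⟨t, ht⟩ := pvRC_cons (a + e + e) ds2
      rw [pvRC, ht]
      have hcond : (a + (a + e + e) == (a + e) * 2) = true := by
        simp; ring
      rw [pvMid, hcond]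
      simp only [if_true, List.nil_append]
      rw [← ht]
      have := ih (a + e) e
      rw [this]
      have htw : ((e :: ds2).takeWhile (· == e)).length = (ds2.takeWhile (· == e)).length + 1 := by
        simp
      have hdw : (e :: ds2).dropWhile (· == e) = ds2.dropWhile (· == e) := by
        simp
      rw [htw, hdw]
      congr 1
      push_cast
      ring
    · obtain ⟨t, ht⟩ := pvRC_cons (a + d + e) ds2
      rw [pvRC, ht]
      have hcond : (a + (a + d + e) == (a + d) * 2) = false := by
        simp only [beq_eq_false_iff_ne, ne_eq]
        intro hc
        exact hde (by omega)
      rw [pvMid, hcond]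
      simp only [Bool.false_eq_true, if_false, List.cons_append, List.nil_append]
      rw [← ht]
      have := ih (a + d) e
      rw [this]
      have htw : (e :: ds2).takeWhile (· == d) = [] := by
        simp [List.takeWhile_cons, beq_iff_eq]
        omega
      have hdw : (e :: ds2).dropWhile (· == d) = e :: ds2 := by
        simp [List.dropWhile_cons, beq_iff_eq]
        omega
      rw [htw, hdw, pvCollapse, pvRC]
      simp only [List.length_nil]
      congr 2
      all_goals push_cast; ring

lemma pv_pass_collapse (a : Int) (ds : List Int) (h : 2 ≤ ds.length) :
    pvFilterOnePass (pvRC a ds) = pvRC a (pvCollapse ds) := by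
  cases ds with
  | nil => simp at h
  | cons d ds2 =>
    rw [pvRC, pv_filter_eq_mid a (pvRC (a + d) ds2)
      (by rw [pvRC_length]; simp at h; omega)]
    rw [pv_mid_collapse ds2 a d, pvCollapse, pvRC]

-- the two loops run in lockstep
lemma pv_loops_agree (fuel : Nat) : ∀ (a : Int) (ds : List Int),
    pvLoopA fuel (pvRC a ds) = pvRC a (pvLoopC fuel ds) := by
  induction fuel with
  | zero => intro a ds; rfl
  | succ n ih =>
    intro a ds
    have hAM : pvHasAM (pvRC a ds) = pvHasRun ds := by
      rw [pv_hasAM_hasRun, pv_diffs_RC]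
    by_cases h : pvHasRun ds = true
    · have hlen : 2 ≤ ds.length := by
        cases ds with
        | nil => simp [pvHasRun] at h
        | cons d tl =>
          cases tl with
          | nil => simp [pvHasRun] at h
          | cons e tl2 => simp
      have hlt := pv_collapse_lt ds h
      simp only [pvLoopA, pvLoopC, hAM, h, if_true]
      rw [if_neg (by omega), pv_pass_collapse a ds hlen]
      exact ih a (pvCollapse ds)
    · have h' : pvHasRun ds = false := by simpa using h
      have hfix := pv_collapse_noRun ds h'
      simp [pvLoopA, pvLoopC, hAM, h', hfix]

-- short diff lists have no run
lemma pv_short_noRun (ds : List Int) (h : ds.length ≤ 1) : pvHasRun ds = false := by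
  cases ds with
  | nil => rfl
  | cons d tl =>
    cases tl with
    | nil => rfl
    | cons e tl2 => simp at h

lemma pv_diffs_length (l : List Int) : (pvDiffs l).length + 1 = max l.length 1 := by
  cases l with
  | nil => simp [pvDiffs]
  | cons a rest =>
    simp [pvDiffs]

-- ===== VERDICT (by name: the statement is the Claim_ definition above) =====
theorem f3_3_spec : Claim_equal_f3_3 := by
  intro L _
  unfold Spec_f3_3 f3_3 f3_3_alt
  cases L with
  | nil => rfl
  | cons x rest =>
    show (if (x :: rest).length ≤ 2 then x :: rest else pvLoopA (x :: rest).length (x :: rest))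
        = pvRecon x (pvLoopC (x :: rest).length (pvDiffs (x :: rest)))
    rw [pv_recon_eq]
    by_cases h : (x :: rest).length ≤ 2
    · rw [if_pos h]
      have hds : (pvDiffs (x :: rest)).length ≤ 1 := by
        have h1 := pv_diffs_length (x :: rest)
        simp only [List.length_cons] at h1 h ⊢
        omega
      have hnr := pv_short_noRun _ hds
      have hfix := pv_collapse_noRun _ hnr
      have hloop : pvLoopC (x :: rest).length (pvDiffs (x :: rest)) = pvDiffs (x :: rest) := by
        cases hL : (x :: rest).length with
        | zero => simp at hL
        | succ n => simp [pvLoopC, hfix]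
      rw [hloop, pv_recon_diffs]
    · rw [if_neg h]
      have h2 := pv_loops_agree (x :: rest).length x (pvDiffs (x :: rest))
      rw [pv_recon_diffs] at h2
      exact h2
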